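-- pv_equiv track=rewrite | github.com/rudybear/lux | tools/ply_to_gltf.py | detect_sh_degree
-- ===== SOURCE A (Python) =====
-- def detect_sh_degree(property_names):
--     """Detect SH degree from f_rest_N property names.
--
--     Returns:
--         int: SH degree (0-3). Returns 0 if no f_rest_* properties found.
--     """
--     rest_count = sum(1 for n in property_names if n.startswith('f_rest_'))
--     if rest_count == 0:
--         return 0
--     # Each degree l has (2l+1) coefficients per channel (3 channels: RGB)
--     # degree 0: 3 DC coeffs (f_dc_0..2) -- always present
--     # degree 1: 9 rest coeffs (f_rest_0..8)
--     # degree 2: 24 total rest (9+15) -> (f_rest_0..23)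
--     # degree 3: 45 total rest (9+15+21) -> (f_rest_0..44)
--     # Total rest: 3 * sum(2l+1 for l=1..degree)
--     for degree in range(1, 5):
--         expected = 3 * sum(2 * l + 1 for l in range(1, degree + 1))
--         if rest_count == expected:
--             return degree
--     # Fallback: use as many as fit
--     return min(3, rest_count // 9)
-- ===== SOURCE B (Python) =====
-- def _isqrt(n):
--     """Integer square root by Newton's method (module uses no imports)."""
--     if n == 0:
--         return 0
--     x = n
--     while True:
--         y = (x + n // x) // 2
--         if y >= x:
--             return x
--         x = y
--
--
-- def detect_sh_degree(property_names):
--     """Detect SH degree by inverting rest_count = 3*d*(d+2) in closed form."""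
--     rest_count = sum(1 for n in property_names if n.startswith('f_rest_'))
--     if rest_count == 0:
--         return 0
--     q, r = divmod(rest_count, 3)
--     if r == 0:
--         t = q + 1
--         s = _isqrt(t)
--         if s * s == t and 1 <= s - 1 <= 4:
--             return s - 1
--     return min(3, rest_count // 9)
-- ===== Notes on version B (the rewrite author's own statement) =====
-- stated objective: alternative
-- what changed: Replaces A's search loop over candidate degrees (each with an inner coefficient sum) by algebraically inverting rest_count = 3*d*(d+2): divmod by 3 plus a Newton-iteration integer square root, with the original fallback on non-exact counts.
import Mathlib
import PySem

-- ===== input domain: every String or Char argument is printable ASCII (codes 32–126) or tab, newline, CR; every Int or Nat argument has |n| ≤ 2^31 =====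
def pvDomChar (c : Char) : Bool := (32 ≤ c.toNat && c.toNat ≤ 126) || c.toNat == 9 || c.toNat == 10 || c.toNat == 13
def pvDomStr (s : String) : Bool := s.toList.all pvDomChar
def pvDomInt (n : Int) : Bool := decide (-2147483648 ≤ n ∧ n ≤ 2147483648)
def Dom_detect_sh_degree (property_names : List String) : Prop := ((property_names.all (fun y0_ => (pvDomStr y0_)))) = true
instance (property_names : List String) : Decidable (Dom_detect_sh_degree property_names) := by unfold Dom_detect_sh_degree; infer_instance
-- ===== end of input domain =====

-- B inverts rest_count = 3*d*(d+2) in closed form (divmod by 3 + Newton integer sqrt) instead of A's degree loop; alternative, same cost.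


-- ===== PORT A =====
def detect_sh_degree (property_names : List String) : Int :=
  let rest_count : Int :=
    property_names.foldl (fun acc n => if PySem.Str.startswith n "f_rest_" then acc + 1 else acc) 0
  if rest_count = 0 then 0
  else
    -- for degree in range(1, 5): early return modelled by an Option accumulator
    match (PySem.List.pyRange 1 5 1).foldl
      (fun (res : Option Int) (degree : Int) =>
        match res with
        | some _ => res
        | none =>
          let expected : Int :=
            3 * (PySem.List.pyRange 1 (degree + 1) 1).foldl (fun s l => s + (2 * l + 1)) 0
          if rest_count = expected then some degree else none) none with
    | some d => d
    | none => min 3 (PySem.Int.floordiv rest_count 9)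

-- ===== PORT B =====
-- Newton's-method integer sqrt (Source B's _isqrt). The Python while-loop terminates because x
-- strictly decreases and stays ≥ 1 for n ≥ 1; fuel n.toNat + 1 covers every iteration it makes,
-- so the fuel is only a totality guard.
def pvIsqrtLoop (fuel : Nat) (n x : Int) : Int :=
  match fuel with
  | 0 => x
  | fuel + 1 =>
    let y := PySem.Int.floordiv (x + PySem.Int.floordiv n x) 2
    if y ≥ x then x else pvIsqrtLoop fuel n y

def pvIsqrt (n : Int) : Int :=
  if n = 0 then 0 else pvIsqrtLoop (n.toNat + 1) n n

def detect_sh_degree_alt (property_names : List String) : Int :=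
  let rest_count : Int :=
    property_names.foldl (fun acc n => if PySem.Str.startswith n "f_rest_" then acc + 1 else acc) 0
  if rest_count = 0 then 0
  else
    let q := PySem.Int.floordiv rest_count 3
    let r := PySem.Int.mod rest_count 3
    if r = 0 then
      let t := q + 1
      let s := pvIsqrt t
      if s * s = t ∧ 1 ≤ s - 1 ∧ s - 1 ≤ 4 then s - 1
      else min 3 (PySem.Int.floordiv rest_count 9)
    else min 3 (PySem.Int.floordiv rest_count 9)

-- ===== PRECONDITION & SPEC =====
def Spec_detect_sh_degree (property_names : List String) (out : Int) : Prop := out = detect_sh_degree_alt property_names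
instance (property_names : List String) (out : Int) : Decidable (Spec_detect_sh_degree property_names out) := by unfold Spec_detect_sh_degree; infer_instance

-- ===== CLAIM (what is proved, stated in full; the proofs are below) =====
def Claim_equal_detect_sh_degree : Prop := ∀ (property_names : List String), Dom_detect_sh_degree property_names → Spec_detect_sh_degree property_names (detect_sh_degree property_names)

-- ===== LEMMAS AND PROOFS =====

-- both function bodies, as a function of the shared rest_count
set_option maxRecDepth 8192 in
theorem detect_body_eq (c : Int) :
    (if c = 0 then (0 : Int)
     else
       match (PySem.List.pyRange 1 5 1).foldl
         (fun (res : Option Int) (degree : Int) =>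
           match res with
           | some _ => res
           | none =>
             let expected : Int :=
               3 * (PySem.List.pyRange 1 (degree + 1) 1).foldl (fun s l => s + (2 * l + 1)) 0
             if c = expected then some degree else none) none with
       | some d => d
       | none => min 3 (PySem.Int.floordiv c 9)) =
    (if c = 0 then (0 : Int)
     else
       let q := PySem.Int.floordiv c 3
       let r := PySem.Int.mod c 3
       if r = 0 then
         let t := q + 1
         let s := pvIsqrt t
         if s * s = t ∧ 1 ≤ s - 1 ∧ s - 1 ≤ 4 then s - 1
         else min 3 (PySem.Int.floordiv c 9)
       else min 3 (PySem.Int.floordiv c 9)) := by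
  by_cases h0 : c = 0
  · simp [h0]
  by_cases h9 : c = 9
  · subst h9; decide
  by_cases h24 : c = 24
  · subst h24; decide
  by_cases h45 : c = 45
  · subst h45; decide
  by_cases h72 : c = 72
  · subst h72; decide
  -- general case: both sides fall through to the fallback
  have h5 : PySem.List.pyRange 1 5 1 = [1, 2, 3, 4] := by decide
  rw [h5]
  have e1 : (3 : Int) * (PySem.List.pyRange 1 (1 + 1) 1).foldl (fun s l => s + (2 * l + 1)) 0 = 9 := by decide
  have e2 : (3 : Int) * (PySem.List.pyRange 1 (2 + 1) 1).foldl (fun s l => s + (2 * l + 1)) 0 = 24 := by decide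
  have e3 : (3 : Int) * (PySem.List.pyRange 1 (3 + 1) 1).foldl (fun s l => s + (2 * l + 1)) 0 = 45 := by decide
  have e4 : (3 : Int) * (PySem.List.pyRange 1 (4 + 1) 1).foldl (fun s l => s + (2 * l + 1)) 0 = 72 := by decide
  simp only [List.foldl, e1, e2, e3, e4]
  simp only [h0, h9, h24, h45, h72, if_false]
  -- B's closed-form branch cannot fire: it would force c ∈ {9, 24, 45, 72}
  by_cases hr : PySem.Int.mod c 3 = 0
  · simp only [hr]
    by_cases hg : (pvIsqrt (PySem.Int.floordiv c 3 + 1)) * (pvIsqrt (PySem.Int.floordiv c 3 + 1)) = PySem.Int.floordiv c 3 + 1 ∧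
        1 ≤ pvIsqrt (PySem.Int.floordiv c 3 + 1) - 1 ∧ pvIsqrt (PySem.Int.floordiv c 3 + 1) - 1 ≤ 4
    · exfalso
      obtain ⟨hsq, hlo, hhi⟩ := hg
      set s := pvIsqrt (PySem.Int.floordiv c 3 + 1) with hs
      have hdm := PySem.Int.floordiv_mul_add_mod c 3
      rw [hr] at hdm
      have hc : c = 3 * (s * s - 1) := by omega
      have hs2 : 2 ≤ s := by omega
      have hs5 : s ≤ 5 := by omega
      interval_cases s <;> omega
    · rw [if_neg hg]
      simp
  · rw [if_neg hr]

-- ===== VERDICT (by name: the statement is the Claim_ definition above) =====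
theorem detect_sh_degree_spec : Claim_equal_detect_sh_degree := by
  intro p _
  unfold Spec_detect_sh_degree detect_sh_degree detect_sh_degree_alt
  exact detect_body_eq _
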